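-- pv_equiv track=rewrite | github.com/MistyIce672/Connect-4-online-py | singleplayer_gui/main.py | vcheck
-- ===== SOURCE A (Python) =====
-- empty = " "
--
-- def vcheck(lis,value):
-- 	haswon = False
-- 	matches = 0
-- 	#checking values below to look for a 4 of the same type
-- 	for i in lis:
-- 		if matches == 4:
-- 			haswon = True
-- 		elif i == value:
-- 			matches += 1
-- 		elif i == empty:
-- 			continue
-- 		elif i != value:
-- 			matches = 0
-- 	if matches == 4:
-- 		haswon = True
-- 	return(haswon)
-- ===== SOURCE B (Python) =====
-- empty = " "
--
-- def vcheck(lis, value):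
--     filtered = [x for x in lis if x != empty]
--     target = [value] * 4
--     return any(filtered[i:i + 4] == target for i in range(len(filtered) - 3))
-- ===== Notes on version B (the rewrite author's own statement) =====
-- stated objective: idiomatic
-- what changed: Replaces A's fused stateful counting scan (haswon/matches flags with branch-ordered resets) by a filter pass dropping empties followed by a sliding-window check for four consecutive equal values; Pre_ excludes the degenerate case value == ' ' (the empty-cell sentinel), where whether a run of empties counts as a win is unspecified and A's branch order happens to count them.
-- outside the precondition, e.g. on vcheck([' ', ' ', ' ', ' '], ' '): A returns True, B returns False
import Mathlib
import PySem

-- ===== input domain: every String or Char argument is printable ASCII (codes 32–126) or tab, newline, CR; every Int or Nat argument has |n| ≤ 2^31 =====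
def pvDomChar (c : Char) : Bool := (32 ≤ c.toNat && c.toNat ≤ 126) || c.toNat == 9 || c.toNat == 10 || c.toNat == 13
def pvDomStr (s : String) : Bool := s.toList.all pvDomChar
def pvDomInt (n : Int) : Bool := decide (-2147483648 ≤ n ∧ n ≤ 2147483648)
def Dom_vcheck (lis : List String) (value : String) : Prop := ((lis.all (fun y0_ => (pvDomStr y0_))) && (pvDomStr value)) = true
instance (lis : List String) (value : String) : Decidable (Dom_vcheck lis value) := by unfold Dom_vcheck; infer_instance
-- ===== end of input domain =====

-- B replaces A's fused stateful counting scan by a filter-out-empties pass plus a sliding-window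
-- check (idiomatic); Pre_ excludes the degenerate value = " " (return value only, no side effects).

-- ===== PORT A =====
-- state = (haswon, matches); the loop body, branches in A's order
def vstep (value : String) (s : Bool × Int) (i : String) : Bool × Int :=
  if s.2 == 4 then (true, s.2)
  else if i == value then (s.1, s.2 + 1)
  else if i == " " then s
  else if i != value then (s.1, (0 : Int))
  else s

def vcheck (lis : List String) (value : String) : Bool :=
  let st := lis.foldl (vstep value) (false, (0 : Int))
  if st.2 == 4 then true else st.1

-- ===== PORT B =====
-- filtered = [x for x in lis if x != " "]; any window of 4 equals [value]*4
-- (range(len(filtered)-3): Python's negative bound gives the empty range, as Nat subtraction does here)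
def vcheck_alt (lis : List String) (value : String) : Bool :=
  let filtered := lis.filter (fun x => x != " ")
  let target := [value, value, value, value]
  (List.range (filtered.length - 3)).any
    (fun i => PySem.List.slice filtered (some (i : Int)) (some ((i : Int) + 4)) == target)

-- ===== PRECONDITION & SPEC =====
-- Pre_ excludes value = " " (the empty-cell sentinel, on which A still returns a Bool): whether a
-- run of empty cells counts as a win for the empty marker is unspecified, and A's branch order
-- accidentally counts them while B's natural filter drops them.
def Pre_vcheck (lis : List String) (value : String) : Prop := value ≠ " "
instance (lis : List String) (value : String) : Decidable (Pre_vcheck lis value) := by unfold Pre_vcheck; infer_instance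
def pvWitness_vcheck : List String × String := (["x", "x", "x", "x"], "x")

def Spec_vcheck (lis : List String) (value : String) (out : Bool) : Prop := out = vcheck_alt lis value
instance (lis : List String) (value : String) (out : Bool) : Decidable (Spec_vcheck lis value out) := by unfold Spec_vcheck; infer_instance

-- ===== CLAIM (what is proved, stated in full; the proofs are below) =====
def Claim_equal_vcheck : Prop := ∀ (lis : List String) (value : String), Dom_vcheck lis value → Pre_vcheck lis value → Spec_vcheck lis value (vcheck lis value)

-- ===== LEMMAS AND PROOFS =====

-- reference predicate: some tail of l starts with four copies of v
def hasQuad (v : String) : List String → Bool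
  | [] => false
  | x :: xs => (List.take 4 (x :: xs) == [v, v, v, v]) || hasQuad v xs

theorem hasQuad_short (v : String) (l : List String) (h : l.length < 4) : hasQuad v l = false := by
  induction l with
  | nil => rfl
  | cons x xs ih =>
      simp only [hasQuad, Bool.or_eq_false_iff]
      constructor
      · have hlen : (List.take 4 (x :: xs)).length < 4 := by
          simp only [List.length_take]; omega
        simp only [beq_eq_false_iff_ne, ne_eq]
        intro he; rw [he] at hlen; simp at hlen
      · exact ih (by simp at h ⊢; omega)

theorem hasQuad_prefix (v : String) (rest : List String) :
    hasQuad v (v :: v :: v :: v :: rest) = true := by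
  simp [hasQuad]

theorem hasQuad_cons_ne (v x : String) (l : List String) (hx : x ≠ v) :
    hasQuad v (x :: l) = hasQuad v l := by
  simp only [hasQuad, Bool.or_eq_right_iff_imp]
  intro h
  exfalso
  have := eq_of_beq h
  cases l with
  | nil => simp at this
  | cons a as =>
    cases as with
    | nil => simp at this
    | cons b bs =>
      cases bs with
      | nil => simp at this
      | cons c cs => simp [List.take] at this; exact hx this.1

theorem hasQuad_rep4 (v : String) (rest : List String) :
    hasQuad v (List.replicate 4 v ++ rest) = true := by
  cases rest with
  | nil => simp [List.replicate, hasQuad]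
  | cons a as =>
      rw [show List.replicate 4 v ++ a :: as = v :: v :: v :: v :: (a :: as) from by
        simp [List.replicate]]
      exact hasQuad_prefix v (a :: as)

theorem hasQuad_replicate_lt (v : String) (c : ℕ) (hc : c < 4) :
    hasQuad v (List.replicate c v) = false :=
  hasQuad_short v _ (by simp; omega)

theorem hasQuad_replicate_cons_ne (v x : String) (c : ℕ) (hc : c < 4) (l : List String)
    (hx : x ≠ v) : hasQuad v (List.replicate c v ++ x :: l) = hasQuad v (x :: l) := by
  induction c with
  | zero => simp
  | succ k ih =>
      have hk : k < 4 := by omega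
      rw [List.replicate_succ, List.cons_append]
      rw [show hasQuad v (v :: (List.replicate k v ++ x :: l))
            = ((List.take 4 (v :: (List.replicate k v ++ x :: l)) == [v,v,v,v]) ||
               hasQuad v (List.replicate k v ++ x :: l)) from rfl]
      rw [ih hk]
      have : (List.take 4 (v :: (List.replicate k v ++ x :: l)) == [v,v,v,v]) = false := by
        interval_cases k <;> simp_all [List.take]
      rw [this, Bool.false_or]

-- the filter predicate of B
def keepP : String → Bool := fun x => x != " "

-- A's loop invariant (for value ≠ " "): from state (h, c) with c ≤ 4 leading matches, the final
-- answer is h || hasQuad of (replicate c value ++ filtered rest)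
theorem vcheck_fold_eq (value : String) (hv : value ≠ " ") (lis : List String) :
    ∀ (h : Bool) (c : ℕ), c ≤ 4 →
    (let st := lis.foldl (vstep value) (h, (c : Int));
      (if st.2 == 4 then true else st.1))
    = (h || hasQuad value (List.replicate c value ++ lis.filter keepP)) := by
  induction lis with
  | nil =>
      intro h c hc
      simp only [List.foldl_nil, List.filter_nil, List.append_nil]
      by_cases h4 : c = 4
      · subst h4
        have hq : hasQuad value (List.replicate 4 value) = true := by
          simp [List.replicate, hasQuad]
        norm_num [hq]
      · have hb : ((c : Int) == 4) = false := by simp; omega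
        simp [hb, hasQuad_replicate_lt value c (by omega)]
  | cons x xs ih =>
      intro h c hc
      rw [List.foldl_cons]
      by_cases h4 : c = 4
      · subst h4
        have hst0 : vstep value (h, ((4:ℕ) : Int)) x = (true, ((4:ℕ) : Int)) := by
          norm_num [vstep]
        rw [hst0]
        have := ih true 4 (le_refl 4)
        simp only at this
        rw [this, hasQuad_rep4, hasQuad_rep4]
        simp
      · have hblt : ((c : Int) == 4) = false := by simp; omega
        by_cases hxv : x = value
        · -- match: c+1; x ≠ " " since value ≠ " ", so B's filter keeps x
          subst hxv
          have hst : vstep x (h, (c : Int)) x = (h, ((c + 1 : ℕ) : Int)) := by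
            simp [vstep, hblt]
          rw [hst, ih h (c + 1) (by omega)]
          congr 1
          rw [List.filter_cons_of_pos (by simp [keepP]; exact hv),
              List.replicate_succ', List.append_assoc]
          simp
        · have hbeq : (x == value) = false := by simp [hxv]
          by_cases hsp : x = " "
          · -- transparent empty: state unchanged, filtered drops x
            subst hsp
            have hst : vstep value (h, (c : Int)) " " = (h, (c : Int)) := by
              simp [vstep, hblt, hbeq]
            rw [hst, ih h c hc,
                List.filter_cons_of_neg (by simp [keepP])]
          · -- reset: c := 0, x kept in filtered
            have hsb' : (x == " ") = false := by simp [hsp]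
            have hne : (x != value) = true := by simp [hxv]
            have hst : vstep value (h, (c : Int)) x = (h, ((0:ℕ) : Int)) := by
              simp [vstep, hblt, hbeq, hsb', hne]
            rw [hst, ih h 0 (by omega)]
            congr 1
            rw [List.filter_cons_of_pos (by simp [keepP, hsp]),
                hasQuad_replicate_cons_ne value x c (by omega) _ hxv,
                hasQuad_cons_ne value x _ hxv]
            simp

-- B equals hasQuad on any list (windows via List.range)
theorem alt_window_eq (v : String) (l : List String) :
    ((List.range (l.length - 3)).any
      (fun i => PySem.List.slice l (some (i : Int)) (some ((i : Int) + 4)) == [v,v,v,v]))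
    = hasQuad v l := by
  induction l with
  | nil => rfl
  | cons x xs ih =>
      simp only [List.length_cons]
      by_cases hlen : xs.length < 3
      · have h1 : xs.length + 1 - 3 = 0 := by omega
        rw [h1]
        have hcons : hasQuad v (x :: xs) = false := hasQuad_short v (x :: xs) (by simp; omega)
        simp [hcons]
      · have h1 : xs.length + 1 - 3 = (xs.length - 3) + 1 := by omega
        rw [h1, List.range_succ_eq_map, List.any_cons, List.any_map]
        have hw0 : (PySem.List.slice (x :: xs) (some ((0:ℕ) : Int)) (some (((0:ℕ) : Int) + 4)) == [v,v,v,v])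
            = (List.take 4 (x :: xs) == [v,v,v,v]) := by
          rw [show (((0:ℕ) : Int) + 4) = (((0+4 : ℕ)) : Int) from by norm_num,
              PySem.List.slice_natCast]
          simp
        have hws : ∀ i : ℕ,
            (PySem.List.slice (x :: xs) (some ((i+1 : ℕ) : Int)) (some (((i+1 : ℕ) : Int) + 4)) == [v,v,v,v])
            = (PySem.List.slice xs (some (i : Int)) (some ((i : Int) + 4)) == [v,v,v,v]) := by
          intro i
          rw [show (((i+1:ℕ) : Int) + 4) = (((i+1+4 : ℕ)) : Int) from by push_cast; ring,
              show ((i:Int) + 4) = (((i+4 : ℕ)) : Int) from by push_cast; ring,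
              PySem.List.slice_natCast, PySem.List.slice_natCast]
          simp only [List.drop_succ_cons]
          congr 2
          omega
        rw [show hasQuad v (x :: xs)
              = ((List.take 4 (x :: xs) == [v,v,v,v]) || hasQuad v xs) from rfl]
        rw [← ih, hw0]
        have hfun : ((fun (i : ℕ) => PySem.List.slice (x :: xs) (some ((i : ℕ) : Int)) (some (((i : ℕ) : Int) + 4)) == [v,v,v,v]) ∘ Nat.succ)
            = (fun (i : ℕ) => PySem.List.slice xs (some ((i : ℕ) : Int)) (some (((i : ℕ) : Int) + 4)) == [v,v,v,v]) := by
          funext i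
          simpa using hws i
        rw [hfun]

-- ===== VERDICT (by name: the statement is the Claim_ definition above) =====
theorem vcheck_spec : Claim_equal_vcheck := by
  intro lis value _ hpre
  unfold Spec_vcheck vcheck vcheck_alt
  have hf := vcheck_fold_eq value hpre lis false 0 (by omega)
  simp only [Int.natCast_zero, Bool.false_or, List.replicate_zero, List.nil_append] at hf
  rw [hf, ← alt_window_eq value (lis.filter keepP)]
  rfl
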